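-- pv_equiv track=rewrite | github.com/IMTorgCustomSoln/workflows-data | pipelines/src/io/utils.py | get_next_batch_from_dict
-- ===== SOURCE A (Python) =====
-- def get_next_batch_from_dict(dictn, batch_count):
--     """...."""
--     if type(dictn)==dict:
--         key_count = len(list(dictn.keys()))
--         keys_accumulator = []
--         accumulator = []
--         for idx, (k,v) in enumerate(dictn.items()):
--             keys_accumulator.append(k)
--             accumulator.extend( v )
--             if len(accumulator)<batch_count and idx<(key_count-1):
--                 pass
--             else:
--                 batch = {k:v for k,v in dictn.items() if k in keys_accumulator}
--                 keys_accumulator.clear()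
--                 accumulator.clear()
--                 yield batch
-- ===== SOURCE B (Python) =====
-- def get_next_batch_from_dict(dictn, batch_count):
--     """Index-and-slice chunking: walk the items once with two indices and
--     yield dict slices, instead of A's accumulator lists and per-yield rescan."""
--     if type(dictn) == dict:
--         items = list(dictn.items())
--         n = len(items)
--         i = 0
--         while i < n:
--             j = i + 1
--             total = len(items[i][1])
--             while total < batch_count and j < n:
--                 total += len(items[j][1])
--                 j += 1
--             yield dict(items[i:j])
--             i = j
-- ===== Notes on version B (the rewrite author's own statement) =====
-- stated objective: faster
-- what changed: B replaces A's accumulator lists and per-yield full rescan of the dict (a membership-filtered comprehension per batch) by a single two-index walk over the item list that emits each batch as a contiguous slice.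
import Mathlib
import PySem

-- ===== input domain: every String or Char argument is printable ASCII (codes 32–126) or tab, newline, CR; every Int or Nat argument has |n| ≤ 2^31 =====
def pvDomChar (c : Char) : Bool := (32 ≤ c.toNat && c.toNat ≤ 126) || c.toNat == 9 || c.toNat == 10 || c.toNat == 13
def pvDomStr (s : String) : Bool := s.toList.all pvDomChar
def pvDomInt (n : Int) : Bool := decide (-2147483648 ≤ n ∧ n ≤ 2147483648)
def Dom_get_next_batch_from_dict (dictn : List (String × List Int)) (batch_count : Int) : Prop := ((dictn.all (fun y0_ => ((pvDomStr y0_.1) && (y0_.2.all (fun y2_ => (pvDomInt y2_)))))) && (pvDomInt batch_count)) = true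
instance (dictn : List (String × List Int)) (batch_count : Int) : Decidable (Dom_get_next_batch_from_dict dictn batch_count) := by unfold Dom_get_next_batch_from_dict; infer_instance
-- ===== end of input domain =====

-- B replaces A's accumulator lists and per-yield rescan by a single two-index walk emitting
-- contiguous slices (measurably faster when batches are many); equivalence is about the list
-- of yielded batches (both Pythons are generators).


-- ===== PORT A =====
-- Loop body of A's for-loop, named so the invariant lemmas below can refer to it.
-- State = (keys_accumulator, accumulator, yielded batches so far).
-- The dict comprehension `{k:v for k,v in dictn.items() if k in keys_accumulator}` is ported as
-- List.filter, exact because a Python dict's keys are distinct (Pre_ below).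
def pvStepA (dictn : List (String × List Int)) (batch_count key_count : Int)
    (st : List String × List Int × List (List (String × List Int)))
    (ikv : Int × String × List Int) :
    List String × List Int × List (List (String × List Int)) :=
  let keys' := st.1 ++ [ikv.2.1]
  let acc' := st.2.1 ++ ikv.2.2
  if (acc'.length : Int) < batch_count ∧ ikv.1 < key_count - 1 then
    (keys', acc', st.2.2)
  else
    ([], [], st.2.2 ++ [dictn.filter (fun p => keys'.contains p.1)])

-- `type(dictn)==dict` always holds for this signature; the returned list is the generator's yields.
def get_next_batch_from_dict (dictn : List (String × List Int)) (batch_count : Int) : List (List (String × List Int)) :=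
  let key_count : Int := ((dictn.map Prod.fst).length : Int)
  ((PySem.List.enumerate dictn 0).foldl (pvStepA dictn batch_count key_count) ([], [], [])).2.2

-- ===== PORT B =====
-- B's inner while loop: extend the current chunk while total < batch_count and items remain;
-- returns (chunk, remaining items).
def pvGrab (batch_count : Int) : List (String × List Int) → Int → List (String × List Int) →
    List (String × List Int) × List (String × List Int)
  | [], _, chunk => (chunk, [])
  | (k, v) :: rest, total, chunk =>
    if total < batch_count then pvGrab batch_count rest (total + (v.length : Int)) (chunk ++ [(k, v)])
    else (chunk, (k, v) :: rest)

theorem pvGrab_rest_le (batch_count : Int) (rest : List (String × List Int)) (total : Int)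
    (chunk : List (String × List Int)) :
    (pvGrab batch_count rest total chunk).2.length ≤ rest.length := by
  induction rest generalizing total chunk with
  | nil => simp [pvGrab]
  | cons p r ih =>
    obtain ⟨k, v⟩ := p
    simp only [pvGrab]
    split
    · exact le_trans (ih _ _) (Nat.le_succ _)
    · simp

-- B's outer while loop: the index walk i := j over items is this recursion on the remaining suffix.
def pvChunks (batch_count : Int) : List (String × List Int) → List (List (String × List Int))
  | [] => []
  | (k, v) :: rest =>
    (pvGrab batch_count rest (v.length : Int) [(k, v)]).1 ::
      pvChunks batch_count (pvGrab batch_count rest (v.length : Int) [(k, v)]).2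
termination_by l => l.length
decreasing_by exact Nat.lt_succ_of_le (pvGrab_rest_le _ _ _ _)

def get_next_batch_from_dict_alt (dictn : List (String × List Int)) (batch_count : Int) : List (List (String × List Int)) :=
  pvChunks batch_count dictn

-- ===== PRECONDITION & SPEC =====
-- A Python dict cannot contain duplicate keys, so the assoc-list encoding with duplicate keys
-- corresponds to no actual input of A; Pre_ restricts to the faithful encodings (it excludes no
-- input A is ever called on).
def Pre_get_next_batch_from_dict (dictn : List (String × List Int)) (batch_count : Int) : Prop :=
  (dictn.map Prod.fst).Nodup

instance (dictn : List (String × List Int)) (batch_count : Int) : Decidable (Pre_get_next_batch_from_dict dictn batch_count) := by unfold Pre_get_next_batch_from_dict; infer_instance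

def pvWitness_get_next_batch_from_dict : (List (String × List Int)) × Int :=
  ([("a", [1]), ("b", [2, 3]), ("c", [])], 2)

def Spec_get_next_batch_from_dict (dictn : List (String × List Int)) (batch_count : Int) (out : List (List (String × List Int))) : Prop := out = get_next_batch_from_dict_alt dictn batch_count
instance (dictn : List (String × List Int)) (batch_count : Int) (out : List (List (String × List Int))) : Decidable (Spec_get_next_batch_from_dict dictn batch_count out) := by unfold Spec_get_next_batch_from_dict; infer_instance

-- ===== CLAIM (what is proved, stated in full; the proofs are below) =====
def Claim_equal_get_next_batch_from_dict : Prop := ∀ (dictn : List (String × List Int)) (batch_count : Int), Dom_get_next_batch_from_dict dictn batch_count → Pre_get_next_batch_from_dict dictn batch_count → Spec_get_next_batch_from_dict dictn batch_count (get_next_batch_from_dict dictn batch_count)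

-- ===== LEMMAS AND PROOFS =====

-- With globally distinct keys, A's rebuilt batch (filter by membership in the current segment's
-- keys) is exactly that contiguous segment.
theorem pvFilter_seg (l₁ seg l₂ : List (String × List Int))
    (hnd : ((l₁ ++ seg ++ l₂).map Prod.fst).Nodup) :
    (l₁ ++ seg ++ l₂).filter (fun p => (seg.map Prod.fst).contains p.1) = seg := by
  simp only [List.map_append, List.nodup_append] at hnd
  obtain ⟨⟨_, hsnd, hd1⟩, _, hd2⟩ := hnd
  rw [List.filter_append, List.filter_append]
  have h1 : l₁.filter (fun p => (seg.map Prod.fst).contains p.1) = [] := by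
    rw [List.filter_eq_nil_iff]
    intro p hp hc
    have hm : p.1 ∈ seg.map Prod.fst := by simpa using hc
    exact hd1 _ (List.mem_map_of_mem hp) _ hm rfl
  have h2 : seg.filter (fun p => (seg.map Prod.fst).contains p.1) = seg := by
    rw [List.filter_eq_self]
    intro p hp
    simpa using List.mem_map_of_mem (f := Prod.fst) hp
  have h3 : l₂.filter (fun p => (seg.map Prod.fst).contains p.1) = [] := by
    rw [List.filter_eq_nil_iff]
    intro p hp hc
    have hm : p.1 ∈ seg.map Prod.fst := by simpa using hc
    exact hd2 _ (List.mem_append_right _ hm) _ (List.mem_map_of_mem hp) rfl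
  rw [h1, h2, h3, List.nil_append, List.append_nil]





-- The main invariant: running A's loop over the remaining suffix, from a fresh state (first
-- conjunct) or mid-chunk with segment `seg` accumulated (second conjunct), appends exactly the
-- chunks B produces.
theorem pvMain (bc : Int) (dictn : List (String × List Int))
    (hnd : (dictn.map Prod.fst).Nodup) :
    ∀ suf : List (String × List Int),
      (∀ (l₁ : List (String × List Int)) (out : List (List (String × List Int))) (s : Int),
        dictn = l₁ ++ suf → s = (l₁.length : Int) →
        ((PySem.List.enumerate suf s).foldl (pvStepA dictn bc (dictn.length : Int)) ([], [], out)).2.2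
          = out ++ pvChunks bc suf)
      ∧ (∀ (l₁ seg : List (String × List Int)) (out : List (List (String × List Int))) (s t : Int),
        dictn = l₁ ++ seg ++ suf → seg ≠ [] → suf ≠ [] →
        s = ((l₁.length : Int) + (seg.length : Int)) →
        t = ((seg.map Prod.snd).flatten.length : Int) → t < bc →
        ((PySem.List.enumerate suf s).foldl (pvStepA dictn bc (dictn.length : Int))
            (seg.map Prod.fst, (seg.map Prod.snd).flatten, out)).2.2
          = out ++ ((pvGrab bc suf t seg).1 :: pvChunks bc (pvGrab bc suf t seg).2)) := by
  intro suf
  induction suf with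
  | nil =>
    constructor
    · intro l₁ out s _ _
      simp [PySem.List.enumerate_nil, pvChunks]
    · intro l₁ seg out s t _ _ hne _ _ _
      exact absurd rfl hne
  | cons p rest ih =>
    obtain ⟨k, v⟩ := p
    obtain ⟨ihM, ihL⟩ := ih
    constructor
    · -- fresh state at item (s, k, v)
      intro l₁ out s hd hs
      have hlen : dictn.length = l₁.length + rest.length + 1 := by
        rw [hd]; simp [List.length_append]; omega
      have hdict : dictn = l₁ ++ [(k, v)] ++ rest := by rw [hd, List.append_assoc]; rfl
      have hf : List.filter (fun p => ([k] : List String).contains p.1) dictn = [(k, v)] := by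
        have h' : ((l₁ ++ [(k, v)] ++ rest).map Prod.fst).Nodup := by
          rw [hdict] at hnd; exact hnd
        have h2 := pvFilter_seg l₁ [(k, v)] rest h'
        rw [hdict]; exact h2
      rw [PySem.List.enumerate_cons, List.foldl_cons]
      simp only [pvStepA, List.nil_append]
      by_cases hrest : rest = []
      · subst hrest
        simp only [List.length_nil] at hlen
        rw [if_neg (by rintro ⟨-, h2⟩; rw [hs] at h2; omega)]
        rw [hf]
        simp [PySem.List.enumerate_nil, pvChunks, pvGrab]
      · have hr := List.length_pos_of_ne_nil hrest
        by_cases hv : ((v.length : Int) < bc)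
        · rw [if_pos ⟨hv, by rw [hs]; omega⟩]
          have h := ihL l₁ [(k, v)] out (s + 1) (v.length : Int)
            hdict (by simp) hrest
            (by rw [hs]; simp) (by simp) hv
          simp only [List.map_cons, List.map_nil, List.flatten_cons, List.flatten_nil,
            List.append_nil] at h
          rw [h, pvChunks]
        · rw [if_neg (by rintro ⟨h1, -⟩; exact hv h1)]
          rw [hf]
          have h := ihM (l₁ ++ [(k, v)]) (out ++ [[(k, v)]]) (s + 1)
            (by rw [hdict, List.append_assoc]) (by rw [hs]; simp)
          rw [h]
          cases rest with
          | nil => exact absurd rfl hrest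
          | cons r0 r' =>
            simp only [pvChunks, pvGrab]
            rw [if_neg hv]
            simp
    · -- mid-chunk with accumulated segment seg at item (s, k, v)
      intro l₁ seg out s t hd hseg _ hs ht htlt
      have hlen : dictn.length = l₁.length + seg.length + rest.length + 1 := by
        rw [hd]; simp [List.length_append]; omega
      have hdict : dictn = l₁ ++ (seg ++ [(k, v)]) ++ rest := by
        rw [hd]; simp
      have hkeys : List.map Prod.fst seg ++ [k] = (seg ++ [(k, v)]).map Prod.fst := by simp
      have hacc : (List.map Prod.snd seg).flatten ++ v = ((seg ++ [(k, v)]).map Prod.snd).flatten := by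
        simp
      have hlacc : (((List.map Prod.snd seg).flatten ++ v).length : Int) = t + (v.length : Int) := by
        rw [ht]; push_cast [List.length_append]; ring
      have hf : List.filter (fun p => (List.map Prod.fst seg ++ [k]).contains p.1) dictn
          = seg ++ [(k, v)] := by
        have h' : ((l₁ ++ (seg ++ [(k, v)]) ++ rest).map Prod.fst).Nodup := by
          rw [hdict] at hnd; exact hnd
        have h2 := pvFilter_seg l₁ (seg ++ [(k, v)]) rest h'
        rw [hdict, hkeys]; exact h2
      rw [PySem.List.enumerate_cons, List.foldl_cons]
      simp only [pvStepA]
      by_cases hrest : rest = []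
      · subst hrest
        simp only [List.length_nil] at hlen
        rw [if_neg (by rintro ⟨-, h2⟩; rw [hs] at h2; omega)]
        rw [hf]
        simp only [pvGrab]
        rw [if_pos htlt]
        simp [PySem.List.enumerate_nil, pvChunks]
      · have hr := List.length_pos_of_ne_nil hrest
        by_cases hv : ((((List.map Prod.snd seg).flatten ++ v).length : Int) < bc)
        · rw [if_pos ⟨hv, by rw [hs]; omega⟩]
          have h := ihL l₁ (seg ++ [(k, v)]) out (s + 1) (t + (v.length : Int))
            hdict (by simp) hrest
            (by rw [hs]; push_cast [List.length_append]; simp; try ring)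
            (by rw [ht, ← hacc]; push_cast [List.length_append]; ring)
            (by rw [← hlacc]; exact hv)
          rw [hkeys, hacc, h]
          simp only [pvGrab]
          rw [if_pos htlt]
        · rw [if_neg (by rintro ⟨h1, -⟩; exact hv h1)]
          rw [hf]
          have h := ihM (l₁ ++ seg ++ [(k, v)]) (out ++ [seg ++ [(k, v)]]) (s + 1)
            (by rw [hd]; simp) (by rw [hs]; push_cast [List.length_append]; simp; try ring)
          rw [h]
          cases rest with
          | nil => exact absurd rfl hrest
          | cons r0 r' =>
            simp only [pvGrab]
            rw [if_pos htlt, if_neg (by rw [← hlacc]; exact hv)]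
            simp

-- ===== VERDICT (by name: the statement is the Claim_ definition above) =====
theorem get_next_batch_from_dict_spec : Claim_equal_get_next_batch_from_dict := by
  intro dictn bc _ hpre
  unfold Spec_get_next_batch_from_dict get_next_batch_from_dict get_next_batch_from_dict_alt
  have h := (pvMain bc dictn hpre dictn).1 [] [] 0 rfl (by simp)
  simpa [List.length_map] using h
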